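-- pv_equiv track=rewrite | github.com/satyapatibandla/Patterns-for-Coding-Interviews | 04_Merge_Intervals/08_min_platforms_required.py | min_platforms_required
-- ===== SOURCE A (Python) =====
-- import heapq
--
-- def min_platforms_required(arr, dep):
--     min_heap = []
--     for a, d in zip(arr, dep):
--         heapq.heappush(min_heap, (a, 1))
--         heapq.heappush(min_heap, (d, -1))
--
--     max_overlap = curr_overlap = 0
--     while min_heap:
--         _, change = heapq.heappop(min_heap)
--         curr_overlap += change
--         if curr_overlap > max_overlap:
--             max_overlap = curr_overlap
--
--     return max_overlap
-- ===== SOURCE B (Python) =====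
-- def min_platforms_required(arr, dep):
--     arrivals = sorted(a for a, d in zip(arr, dep))
--     departures = sorted(d for a, d in zip(arr, dep))
--     n = len(arrivals)
--     count = max_count = i = j = 0
--     while i < n and j < n:
--         if arrivals[i] < departures[j]:
--             count += 1
--             i += 1
--             if count > max_count:
--                 max_count = count
--         else:
--             count -= 1
--             j += 1
--     return max(max_count, count + (n - i))
-- ===== Notes on version B (the rewrite author's own statement) =====
-- stated objective: faster
-- what changed: Replaces the heap of 2n (time, +1/-1) events popped one by one with the classic two-pointer sweep over the two separately sorted arrival and departure lists (strict '<' so a departure at the same time is processed first, exactly as the heap's (t,-1) pops before (t,1)); two library sorts plus a linear scan beat 4n·log heap operations by a constant factor.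
import Mathlib
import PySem

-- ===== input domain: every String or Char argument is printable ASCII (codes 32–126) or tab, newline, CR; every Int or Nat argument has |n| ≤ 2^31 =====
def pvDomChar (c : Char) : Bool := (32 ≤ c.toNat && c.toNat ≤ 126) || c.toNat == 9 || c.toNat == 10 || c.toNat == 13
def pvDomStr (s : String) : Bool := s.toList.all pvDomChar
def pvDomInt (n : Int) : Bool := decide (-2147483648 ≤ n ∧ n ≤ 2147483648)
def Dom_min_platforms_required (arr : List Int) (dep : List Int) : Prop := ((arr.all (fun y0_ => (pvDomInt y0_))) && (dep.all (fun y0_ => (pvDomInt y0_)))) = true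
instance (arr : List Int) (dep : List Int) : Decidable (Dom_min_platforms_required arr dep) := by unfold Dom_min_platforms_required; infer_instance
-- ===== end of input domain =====

-- B replaces A's heap of 2n (time, ±1) events by the two-pointer sweep over the separately
-- sorted arrival and departure times (objective: faster by a constant factor, measured).

-- ===== PORT A =====
-- heapq on (Int × Int) pairs, ported as a priority queue kept as a list sorted in the
-- lexicographic order heapq pops in: heappush = ordered insert, heappop = head.
def heappush (h : List (Int × Int)) (x : Int × Int) : List (Int × Int) :=
  match h with
  | [] => [x]
  | y :: ys => if x.1 < y.1 ∨ (x.1 = y.1 ∧ x.2 ≤ y.2) then x :: y :: ys else y :: heappush ys x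

-- the `while min_heap:` loop: pop the least event, add its change, update the max
def sweepA : List (Int × Int) → Int → Int → Int
  | [], _, max_overlap => max_overlap
  | (_, change) :: t, curr_overlap, max_overlap =>
      sweepA t (curr_overlap + change)
        (if curr_overlap + change > max_overlap then curr_overlap + change else max_overlap)

def min_platforms_required (arr : List Int) (dep : List Int) : Int :=
  let min_heap := (arr.zip dep).foldl (fun h p => heappush (heappush h (p.1, 1)) (p.2, -1)) []
  sweepA min_heap 0 0

-- ===== PORT B =====
-- the `while i < n and j < n:` two-pointer loop, as recursion on the two suffixes;
-- the fallback case is the final `return max(max_count, count + (n - i))`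
def sweepB : List Int → List Int → Int → Int → Int
  | a :: as, d :: ds, count, max_count =>
      if a < d then
        sweepB as (d :: ds) (count + 1) (if count + 1 > max_count then count + 1 else max_count)
      else
        sweepB (a :: as) ds (count - 1) max_count
  | as, _, count, max_count => max max_count (count + (as.length : Int))
  termination_by as ds => as.length + ds.length

def min_platforms_required_alt (arr : List Int) (dep : List Int) : Int :=
  let arrivals := PySem.List.sorted ((arr.zip dep).map Prod.fst) (fun x => x) false
  let departures := PySem.List.sorted ((arr.zip dep).map Prod.snd) (fun x => x) false
  sweepB arrivals departures 0 0

-- ===== PRECONDITION & SPEC =====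
def Spec_min_platforms_required (arr : List Int) (dep : List Int) (out : Int) : Prop := out = min_platforms_required_alt arr dep
instance (arr : List Int) (dep : List Int) (out : Int) : Decidable (Spec_min_platforms_required arr dep out) := by unfold Spec_min_platforms_required; infer_instance

-- ===== CLAIM (what is proved, stated in full; the proofs are below) =====
def Claim_equal_min_platforms_required : Prop := ∀ (arr : List Int) (dep : List Int), Dom_min_platforms_required arr dep → Spec_min_platforms_required arr dep (min_platforms_required arr dep)

-- ===== LEMMAS AND PROOFS =====

-- the lexicographic order heapq pops (Int × Int) pairs in
def pairLe (p q : Int × Int) : Prop := p.1 < q.1 ∨ (p.1 = q.1 ∧ p.2 ≤ q.2)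

theorem pairLe_total (p q : Int × Int) : pairLe p q ∨ pairLe q p := by
  unfold pairLe; omega

theorem pairLe_trans (p q r : Int × Int) : pairLe p q → pairLe q r → pairLe p r := by
  unfold pairLe; omega

theorem pairLe_antisymm (p q : Int × Int) : pairLe p q → pairLe q p → p = q := by
  unfold pairLe
  intro h1 h2
  have : p.1 = q.1 ∧ p.2 = q.2 := by omega
  exact Prod.ext this.1 this.2

-- the 2n events A pushes, in push order
def events (pairs : List (Int × Int)) : List (Int × Int) :=
  pairs.flatMap (fun p => [(p.1, 1), (p.2, -1)])

theorem heappush_perm (h : List (Int × Int)) (x : Int × Int) :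
    (heappush h x).Perm (x :: h) := by
  induction h with
  | nil => simp [heappush]
  | cons y ys ih =>
      unfold heappush
      split
      · exact List.Perm.refl _
      · exact (ih.cons y).trans (List.Perm.swap x y ys)

theorem heappush_sorted (h : List (Int × Int)) (x : Int × Int)
    (hs : h.Pairwise pairLe) : (heappush h x).Pairwise pairLe := by
  induction h with
  | nil => simp [heappush]
  | cons y ys ih =>
      unfold heappush
      split
      · rename_i hxy
        refine List.Pairwise.cons ?_ hs
        intro z hz
        rcases List.mem_cons.mp hz with rfl | hz
        · exact hxy
        · exact pairLe_trans _ _ _ hxy ((List.pairwise_cons.mp hs).1 z hz)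
      · rename_i hxy
        have hyx : pairLe y x := by
          rcases pairLe_total x y with h1 | h1
          · exact absurd h1 hxy
          · exact h1
        rcases List.pairwise_cons.mp hs with ⟨hy, hys⟩
        refine List.Pairwise.cons ?_ (ih hys)
        intro z hz
        rcases List.mem_cons.mp ((heappush_perm ys x).mem_iff.mp hz) with rfl | hz'
        · exact hyx
        · exact hy z hz'

theorem heap_foldl_perm (pairs : List (Int × Int)) (h : List (Int × Int)) :
    (pairs.foldl (fun h p => heappush (heappush h (p.1, 1)) (p.2, -1)) h).Perm
      (events pairs ++ h) := by
  induction pairs generalizing h with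
  | nil => simp [events]
  | cons p ps ih =>
      simp only [List.foldl_cons]
      refine (ih _).trans ?_
      have h1 : (heappush (heappush h (p.1, 1)) (p.2, -1)).Perm ((p.2, -1) :: (p.1, 1) :: h) :=
        (heappush_perm _ _).trans ((heappush_perm h (p.1, 1)).cons _)
      refine (List.Perm.append_left (events ps) h1).trans ?_
      show (events ps ++ (p.2, -1) :: (p.1, 1) :: h).Perm
        ((p.1, 1) :: (p.2, -1) :: events ps ++ h)
      exact List.perm_middle.trans
        ((List.perm_middle.cons _).trans (List.Perm.swap _ _ _))

theorem heap_foldl_sorted (pairs : List (Int × Int)) (h : List (Int × Int))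
    (hs : h.Pairwise pairLe) :
    (pairs.foldl (fun h p => heappush (heappush h (p.1, 1)) (p.2, -1)) h).Pairwise pairLe := by
  induction pairs generalizing h with
  | nil => exact hs
  | cons p ps ih =>
      exact ih _ (heappush_sorted _ _ (heappush_sorted _ _ hs))

-- the merged event list B's two-pointer loop implicitly walks
def mergeEv : List Int → List Int → List (Int × Int)
  | a :: as, d :: ds =>
      if a < d then (a, 1) :: mergeEv as (d :: ds) else (d, -1) :: mergeEv (a :: as) ds
  | as, [] => as.map (fun a => (a, 1))
  | [], ds => ds.map (fun d => (d, -1))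
  termination_by as ds => as.length + ds.length

theorem mergeEv_perm (as ds : List Int) :
    (mergeEv as ds).Perm (as.map (fun a => (a, 1)) ++ ds.map (fun d => (d, -1))) := by
  fun_induction mergeEv as ds with
  | case1 a as d ds hlt ih =>
      simpa using ih.cons (a, 1)
  | case2 a as d ds hlt ih =>
      refine (ih.cons (d, -1)).trans ?_
      exact List.perm_middle.symm
  | case3 as => simp
  | case4 ds => simp

theorem mergeEv_mem (as ds : List Int) (x : Int × Int) (hx : x ∈ mergeEv as ds) :
    (∃ a ∈ as, x = (a, 1)) ∨ (∃ d ∈ ds, x = (d, -1)) := by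
  have := (mergeEv_perm as ds).mem_iff.mp hx
  rw [List.mem_append] at this
  rcases this with h | h
  · left; simpa [eq_comm] using h
  · right; simpa [eq_comm] using h

theorem mergeEv_sorted (as ds : List Int)
    (ha : as.Pairwise (· ≤ ·)) (hd : ds.Pairwise (· ≤ ·)) :
    (mergeEv as ds).Pairwise pairLe := by
  fun_induction mergeEv as ds with
  | case1 a as d ds hlt ih =>
      rcases List.pairwise_cons.mp ha with ⟨haall, ha'⟩
      refine List.Pairwise.cons ?_ (ih ha' hd)
      intro z hz
      rcases mergeEv_mem _ _ _ hz with ⟨a', ha'', rfl⟩ | ⟨d', hd'', rfl⟩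
      · have := haall a' ha''
        unfold pairLe; simp; omega
      · rcases List.mem_cons.mp hd'' with rfl | hd''
        · unfold pairLe; simp; omega
        · have := (List.pairwise_cons.mp hd).1 d' hd''
          unfold pairLe; simp; omega
  | case2 a as d ds hlt ih =>
      rcases List.pairwise_cons.mp hd with ⟨hdall, hd'⟩
      refine List.Pairwise.cons ?_ (ih ha hd')
      intro z hz
      rcases mergeEv_mem _ _ _ hz with ⟨a', ha'', rfl⟩ | ⟨d', hd'', rfl⟩
      · rcases List.mem_cons.mp ha'' with rfl | ha''
        · unfold pairLe; simp; omega
        · have := (List.pairwise_cons.mp ha).1 a' ha''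
          unfold pairLe; simp; omega
      · have := hdall d' hd''
        unfold pairLe; simp; omega
  | case3 as =>
      refine List.pairwise_map.mpr ?_
      exact ha.imp (fun hab => by unfold pairLe; omega)
  | case4 ds =>
      refine List.pairwise_map.mpr ?_
      exact hd.imp (fun hab => by unfold pairLe; omega)

-- the events of the zipped pairs, regrouped as tagged arrivals ++ tagged departures
theorem events_perm (ps : List (Int × Int)) :
    (events ps).Perm
      ((ps.map Prod.fst).map (fun a => (a, 1)) ++ (ps.map Prod.snd).map (fun d => (d, -1))) := by
  induction ps with
  | nil => simp [events]
  | cons p ps ih =>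
      show ((p.1, 1) :: (p.2, -1) :: events ps).Perm _
      simp only [List.map_cons, List.cons_append]
      exact ((ih.cons _).cons _).trans (List.Perm.cons _ List.perm_middle.symm)

-- sweepA over arrivals only: the max just absorbs the final count
theorem sweepA_all_up (as : List Int) (c m : Int) (h : c ≤ m) :
    sweepA (as.map (fun a => (a, 1))) c m = max m (c + (as.length : Int)) := by
  induction as generalizing c m with
  | nil =>
      simp only [List.map_nil, sweepA, List.length_nil, Nat.cast_zero, add_zero, Int.max_def]
      split_ifs <;> omega
  | cons a as ih =>
      simp only [List.map_cons, sweepA, List.length_cons]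
      by_cases hc : c + 1 > m
      · rw [if_pos hc, ih (c + 1) (c + 1) le_rfl, Int.max_def, Int.max_def]
        push_cast
        split_ifs <;> omega
      · rw [if_neg hc, ih (c + 1) m (by omega), Int.max_def, Int.max_def]
        push_cast
        split_ifs <;> omega

-- sweepA over departures only never raises the max
theorem sweepA_all_down (ds : List Int) (c m : Int) (h : c ≤ m) :
    sweepA (ds.map (fun d => (d, -1))) c m = m := by
  induction ds generalizing c with
  | nil => simp [sweepA]
  | cons d ds ih =>
      simp only [List.map_cons, sweepA]
      rw [if_neg (by omega : ¬(c + -1 > m))]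
      exact ih (c + -1) (by omega)

theorem sweepB_eq_sweepA (as ds : List Int) (c m : Int) (h : c ≤ m) :
    sweepB as ds c m = sweepA (mergeEv as ds) c m := by
  fun_induction sweepB as ds c m with
  | case1 a as d ds c m hlt ih =>
      rw [mergeEv, if_pos hlt]
      simp only [sweepA]
      exact ih (by split <;> omega)
  | case2 a as d ds c m hlt ih =>
      rw [mergeEv, if_neg hlt]
      simp only [sweepA]
      rw [if_neg (by omega : ¬(c + -1 > m))]
      have e : c + -1 = c - 1 := by ring
      rw [e]
      exact ih (by omega)
  | case3 as ds c m hne =>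
      rcases ds with _ | ⟨d, ds⟩
      · rw [mergeEv, sweepA_all_up as c m h]
      · rcases as with _ | ⟨a, as⟩
        · rw [mergeEv, sweepA_all_down _ _ _ h]
          · simp only [List.length_nil, Nat.cast_zero, add_zero, Int.max_def]
            split_ifs <;> omega
          · simp
        · exact (hne a as d ds rfl rfl).elim

-- A's fully-pushed heap IS B's merged event list: both are pairLe-sorted permutations of `events`
theorem heap_eq_mergeEv (arr dep : List Int) :
    (arr.zip dep).foldl (fun h p => heappush (heappush h (p.1, 1)) (p.2, -1)) [] =
      mergeEv (PySem.List.sorted ((arr.zip dep).map Prod.fst) (fun x => x) false)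
              (PySem.List.sorted ((arr.zip dep).map Prod.snd) (fun x => x) false) := by
  set AS := PySem.List.sorted ((arr.zip dep).map Prod.fst) (fun x => x) false with hAS
  set DS := PySem.List.sorted ((arr.zip dep).map Prod.snd) (fun x => x) false with hDS
  refine List.Perm.eq_of_pairwise (fun a b _ _ => pairLe_antisymm a b) ?_ ?_ ?_
  · exact heap_foldl_sorted _ [] (by simp)
  · exact mergeEv_sorted AS DS
      (by simpa using PySem.List.sorted_pairwise ((arr.zip dep).map Prod.fst) (fun x => x))
      (by simpa using PySem.List.sorted_pairwise ((arr.zip dep).map Prod.snd) (fun x => x))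
  · have hASp : AS.Perm ((arr.zip dep).map Prod.fst) := PySem.List.sorted_perm _ _ _
    have hDSp : DS.Perm ((arr.zip dep).map Prod.snd) := PySem.List.sorted_perm _ _ _
    refine ((heap_foldl_perm _ []).trans ?_).trans (mergeEv_perm AS DS).symm
    rw [List.append_nil]
    exact (events_perm _).trans
      (List.Perm.append (hASp.map (fun a => (a, 1))).symm (hDSp.map (fun d => (d, -1))).symm)

-- ===== VERDICT (by name: the statement is the Claim_ definition above) =====
theorem min_platforms_required_spec : Claim_equal_min_platforms_required := by
  intro arr dep _
  unfold Spec_min_platforms_required min_platforms_required min_platforms_required_alt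
  rw [heap_eq_mergeEv]
  exact (sweepB_eq_sweepA _ _ 0 0 le_rfl).symm
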